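-- pv_equiv track=rewrite | github.com/boldsoftware/exe.dev | .buildkite/steps/generate-pipeline.py | _generate_migration_shards_text
-- ===== SOURCE A (Python) =====
-- MIGRATION_TEST_COSTS = [
--     ("TestDirectMigrationCold", 31),
--     ("TestDirectMigrationLive", 51),
--     ("TestDirectMigrationOperatorSSHCold", 32),
--     ("TestDirectMigrationOperatorSSHLive", 55),
--     ("TestDirectMigrationOrphanedDataset", 30),
--     ("TestDirectMigrationReconnect", 25),
--     ("TestDirectMigrationResumable", 34),
--     ("TestDirectMigrationResumablePhase2", 24),
-- ]
--
-- def split_migration_tests(n_shards):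
--     """Split MIGRATION_TEST_COSTS into n_shards balanced groups.
--
--     Uses longest-processing-time-first greedy partitioning: assign each
--     test (in decreasing cost order) to the currently-lightest shard.
--     Produces an (up to 4/3)-approximation of the optimal makespan, which
--     is plenty for 5 items and 2 shards.
--
--     Returns a list of lists of test names.
--     """
--     tests = sorted(MIGRATION_TEST_COSTS, key=lambda t: -t[1])
--     shards = [[] for _ in range(n_shards)]
--     loads = [0] * n_shards
--     for name, cost in tests:
--         i = loads.index(min(loads))
--         shards[i].append(name)
--         loads[i] += cost
--     return shards
--
-- def _generate_migration_shards_text(exelets_vm_concurrency, migration_shards, coverage):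
--     """YAML for the exelets-migration shard steps. Sharded because the
--     TestDirectMigration* tests are serial and dominate the critical path."""
--     lines = []
--     shards = split_migration_tests(migration_shards)
--     for i, tests in enumerate(shards):
--         shard_num = i + 1
--         label = f"migration-{shard_num}"
--         # -run filter: anchored exact-match alternation so "TestDirectMigration"
--         # doesn't accidentally match "TestDirectMigrationResumable".
--         run_filter = "^(" + "|".join(tests) + ")$"
--         lines.append(f'- label: ":arrow_right_hook: e1e migration ({shard_num}/{migration_shards})"')
--         lines.append(f'  key: test-exelets-{label}')
--         lines.append('  depends_on:')
--         lines.append('    - build-e1e')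
--         lines.append('    - ensure-snapshot')
--         lines.append('  command: python3 .buildkite/steps/test-e1e-exelets.py')
--         lines.append('  timeout_in_minutes: 10')
--         lines.append('  env:')
--         lines.append('    VM_DRIVER: cloudhypervisor')
--         lines.append(f'    E1E_EXELETS_VM_CONCURRENCY: "{exelets_vm_concurrency}"')
--         lines.append(f'    E1E_EXELETS_RUN_FILTER: "{run_filter}"')
--         lines.append(f'    E1E_EXELETS_LABEL: "{label}"')
--         # Direct-migration tests are bottlenecked on zfs send/recv CPU inside
--         # the outer CI VM. Give these shards more vCPUs (default is 4).
--         lines.append('    VCPUS: "8"')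
--         if coverage:
--             lines.append(f'    E1E_COVERAGE: "true"')
--         lines.append('  artifact_paths:')
--         lines.append(f'    - "e1e-results-{label}.json"')
--         lines.append(f'    - "test-gantt-{label}.html"')
--         lines.append(f'    - "e1e-results-{label}.xml"')
--         lines.append(f'    - "e1e-logs-{label}/**/*"')
--         if coverage:
--             lines.append(f'    - "coverage-{label}.txt"')
--         lines.append('')
--     return "\n".join(lines)
-- ===== SOURCE B (Python) =====
-- MIGRATION_TEST_COSTS = [
--     ("TestDirectMigrationCold", 31),
--     ("TestDirectMigrationLive", 51),
--     ("TestDirectMigrationOperatorSSHCold", 32),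
--     ("TestDirectMigrationOperatorSSHLive", 55),
--     ("TestDirectMigrationOrphanedDataset", 30),
--     ("TestDirectMigrationReconnect", 25),
--     ("TestDirectMigrationResumable", 34),
--     ("TestDirectMigrationResumablePhase2", 24),
-- ]
--
-- def split_migration_tests(n_shards):
--     """LPT partition via a sorted (load, shard_index) priority queue:
--     pop the lightest shard (lowest index on ties, because the index is the
--     tuple's secondary key), give it the next-costliest test, reinsert."""
--     queue = [(0, i) for i in range(n_shards)]  # kept sorted ascending
--     shards = [[] for _ in range(n_shards)]
--     for name, cost in sorted(MIGRATION_TEST_COSTS, key=lambda t: t[1], reverse=True):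
--         load, i = queue.pop(0)
--         shards[i].append(name)
--         entry = (load + cost, i)
--         lo = 0
--         while lo < len(queue) and queue[lo] < entry:
--             lo += 1
--         queue.insert(lo, entry)
--     return shards
--
-- def _block(shard_num, migration_shards, tests, exelets_vm_concurrency, coverage):
--     label = f"migration-{shard_num}"
--     run_filter = "^(" + "|".join(tests) + ")$"
--     cov_env = '\n    E1E_COVERAGE: "true"' if coverage else ""
--     cov_art = f'\n    - "coverage-{label}.txt"' if coverage else ""
--     return f'''- label: ":arrow_right_hook: e1e migration ({shard_num}/{migration_shards})"
--   key: test-exelets-{label}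
--   depends_on:
--     - build-e1e
--     - ensure-snapshot
--   command: python3 .buildkite/steps/test-e1e-exelets.py
--   timeout_in_minutes: 10
--   env:
--     VM_DRIVER: cloudhypervisor
--     E1E_EXELETS_VM_CONCURRENCY: "{exelets_vm_concurrency}"
--     E1E_EXELETS_RUN_FILTER: "{run_filter}"
--     E1E_EXELETS_LABEL: "{label}"
--     VCPUS: "8"{cov_env}
--   artifact_paths:
--     - "e1e-results-{label}.json"
--     - "test-gantt-{label}.html"
--     - "e1e-results-{label}.xml"
--     - "e1e-logs-{label}/**/*"{cov_art}
-- '''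
--
-- def _generate_migration_shards_text(exelets_vm_concurrency, migration_shards, coverage):
--     return "\n".join(
--         _block(i + 1, migration_shards, tests, exelets_vm_concurrency, coverage)
--         for i, tests in enumerate(split_migration_tests(migration_shards)))
-- ===== Notes on version B (the rewrite author's own statement) =====
-- stated objective: alternative
-- what changed: split_migration_tests now pops the lightest shard from a sorted (load, shard-index) priority queue (index as tie-breaker) instead of rescanning loads with loads.index(min(loads)) each iteration, and the YAML is built by joining one per-shard block template instead of appending 21 single lines per shard.
import Mathlib
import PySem

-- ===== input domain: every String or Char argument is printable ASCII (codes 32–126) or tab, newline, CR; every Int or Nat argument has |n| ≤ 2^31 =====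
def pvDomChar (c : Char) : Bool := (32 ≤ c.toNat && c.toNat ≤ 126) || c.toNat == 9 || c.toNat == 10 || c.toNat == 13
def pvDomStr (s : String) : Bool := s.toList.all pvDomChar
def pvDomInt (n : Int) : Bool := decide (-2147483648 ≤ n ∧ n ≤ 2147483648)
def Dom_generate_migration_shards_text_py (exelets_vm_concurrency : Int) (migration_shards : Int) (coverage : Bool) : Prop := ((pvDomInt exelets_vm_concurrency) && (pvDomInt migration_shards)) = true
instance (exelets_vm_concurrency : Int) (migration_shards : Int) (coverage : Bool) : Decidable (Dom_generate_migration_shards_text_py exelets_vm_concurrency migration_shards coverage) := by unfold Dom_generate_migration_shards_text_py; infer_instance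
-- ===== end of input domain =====

-- B replaces A's per-test rescan of the loads list by a sorted (load, shard-index)
-- priority queue and builds each YAML step from one block template instead of 21
-- single-line appends; same return value on every input with migration_shards ≥ 1.

-- ===== PORT A =====
def pvCosts : List (String × Int) := [
  ("TestDirectMigrationCold", 31),
  ("TestDirectMigrationLive", 51),
  ("TestDirectMigrationOperatorSSHCold", 32),
  ("TestDirectMigrationOperatorSSHLive", 55),
  ("TestDirectMigrationOrphanedDataset", 30),
  ("TestDirectMigrationReconnect", 25),
  ("TestDirectMigrationResumable", 34),
  ("TestDirectMigrationResumablePhase2", 24)]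

-- loop body of A's split_migration_tests: i = loads.index(min(loads)); the .getD 0
-- defaults only totalize the empty-loads case, which Pre_ excludes (Python raises there)
def pvStepA (st : List (List String) × List Int) (tc : String × Int) :
    List (List String) × List Int :=
  let i : Int := ((PySem.List.index? st.2 ((PySem.List.min? st.2 (fun x => x)).getD 0)).getD 0 : Nat)
  (PySem.List.pySetD st.1 i (PySem.List.pyGetD st.1 i [] ++ [tc.1]),
   PySem.List.pySetD st.2 i (PySem.List.pyGetD st.2 i 0 + tc.2))

def pvSplitA (n_shards : Int) : List (List String) :=
  let tests := PySem.List.sorted pvCosts (fun t => -t.2) false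
  let shards : List (List String) := (PySem.List.pyRange 0 n_shards 1).map (fun _ => [])
  let loads : List Int := PySem.List.pyRepeat [0] n_shards
  (tests.foldl pvStepA (shards, loads)).1

def generate_migration_shards_text_py (exelets_vm_concurrency : Int) (migration_shards : Int) (coverage : Bool) : String :=
  let shards := pvSplitA migration_shards
  let lines : List String :=
    (PySem.List.enumerate shards 0).foldl (fun lines it =>
      let shard_num := it.1 + 1
      let label := "migration-" ++ PySem.Int.toStr shard_num
      let run_filter := "^(" ++ PySem.Str.join "|" it.2 ++ ")$"
      let lines := lines ++ ["- label: \":arrow_right_hook: e1e migration (" ++ PySem.Int.toStr shard_num ++ "/" ++ PySem.Int.toStr migration_shards ++ ")\""]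
      let lines := lines ++ ["  key: test-exelets-" ++ label]
      let lines := lines ++ ["  depends_on:"]
      let lines := lines ++ ["    - build-e1e"]
      let lines := lines ++ ["    - ensure-snapshot"]
      let lines := lines ++ ["  command: python3 .buildkite/steps/test-e1e-exelets.py"]
      let lines := lines ++ ["  timeout_in_minutes: 10"]
      let lines := lines ++ ["  env:"]
      let lines := lines ++ ["    VM_DRIVER: cloudhypervisor"]
      let lines := lines ++ ["    E1E_EXELETS_VM_CONCURRENCY: \"" ++ PySem.Int.toStr exelets_vm_concurrency ++ "\""]
      let lines := lines ++ ["    E1E_EXELETS_RUN_FILTER: \"" ++ run_filter ++ "\""]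
      let lines := lines ++ ["    E1E_EXELETS_LABEL: \"" ++ label ++ "\""]
      let lines := lines ++ ["    VCPUS: \"8\""]
      let lines := if coverage then lines ++ ["    E1E_COVERAGE: \"true\""] else lines
      let lines := lines ++ ["  artifact_paths:"]
      let lines := lines ++ ["    - \"e1e-results-" ++ label ++ ".json\""]
      let lines := lines ++ ["    - \"test-gantt-" ++ label ++ ".html\""]
      let lines := lines ++ ["    - \"e1e-results-" ++ label ++ ".xml\""]
      let lines := lines ++ ["    - \"e1e-logs-" ++ label ++ "/**/*\""]
      let lines := if coverage then lines ++ ["    - \"coverage-" ++ label ++ ".txt\""] else lines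
      lines ++ [""]) []
  PySem.Str.join "\n" lines

-- ===== PORT B =====
-- Python tuple '<' on (load, shard_index) pairs of ints (lexicographic)
def pvLtPair (a b : Int × Int) : Bool := a.1 < b.1 || (a.1 == b.1 && a.2 < b.2)

-- hand port (exact) of B's scan-and-insert: the while loop counts the leading
-- entries < e and list.insert puts e right after them
def pvInsort (q : List (Int × Int)) (e : Int × Int) : List (Int × Int) :=
  match q with
  | [] => [e]
  | x :: t => if pvLtPair x e then x :: pvInsort t e else e :: x :: t

-- loop body of B's split_migration_tests; the .getD defaults only totalize the
-- empty-queue case, which Pre_ excludes (Python raises there)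
def pvStepB (st : List (List String) × List (Int × Int)) (tc : String × Int) :
    List (List String) × List (Int × Int) :=
  let p := (PySem.List.pop? st.2 0).getD (((0 : Int), (0 : Int)), [])
  (PySem.List.pySetD st.1 p.1.2 (PySem.List.pyGetD st.1 p.1.2 [] ++ [tc.1]),
   pvInsort p.2 (p.1.1 + tc.2, p.1.2))

def pvSplitB (n_shards : Int) : List (List String) :=
  let queue : List (Int × Int) := (PySem.List.pyRange 0 n_shards 1).map (fun i => ((0 : Int), i))
  let shards : List (List String) := (PySem.List.pyRange 0 n_shards 1).map (fun _ => [])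
  ((PySem.List.sorted pvCosts (fun t => t.2) true).foldl pvStepB (shards, queue)).1

def pvBlock (shard_num : Int) (migration_shards : Int) (tests : List String) (exelets_vm_concurrency : Int) (coverage : Bool) : String :=
  let label := "migration-" ++ PySem.Int.toStr shard_num
  let run_filter := "^(" ++ PySem.Str.join "|" tests ++ ")$"
  let cov_env := if coverage then "\n    E1E_COVERAGE: \"true\"" else ""
  let cov_art := if coverage then "\n    - \"coverage-" ++ label ++ ".txt\"" else ""
  "- label: \":arrow_right_hook: e1e migration (" ++ PySem.Int.toStr shard_num ++ "/" ++ PySem.Int.toStr migration_shards ++ ")\"\n" ++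
  "  key: test-exelets-" ++ label ++ "\n" ++
  "  depends_on:\n    - build-e1e\n    - ensure-snapshot\n" ++
  "  command: python3 .buildkite/steps/test-e1e-exelets.py\n  timeout_in_minutes: 10\n  env:\n" ++
  "    VM_DRIVER: cloudhypervisor\n" ++
  "    E1E_EXELETS_VM_CONCURRENCY: \"" ++ PySem.Int.toStr exelets_vm_concurrency ++ "\"\n" ++
  "    E1E_EXELETS_RUN_FILTER: \"" ++ run_filter ++ "\"\n" ++
  "    E1E_EXELETS_LABEL: \"" ++ label ++ "\"\n" ++
  "    VCPUS: \"8\"" ++ cov_env ++ "\n" ++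
  "  artifact_paths:\n" ++
  "    - \"e1e-results-" ++ label ++ ".json\"\n" ++
  "    - \"test-gantt-" ++ label ++ ".html\"\n" ++
  "    - \"e1e-results-" ++ label ++ ".xml\"\n" ++
  "    - \"e1e-logs-" ++ label ++ "/**/*\"" ++ cov_art ++ "\n"

def generate_migration_shards_text_py_alt (exelets_vm_concurrency : Int) (migration_shards : Int) (coverage : Bool) : String :=
  PySem.Str.join "\n" ((PySem.List.enumerate (pvSplitB migration_shards) 0).map
    (fun it => pvBlock (it.1 + 1) migration_shards it.2 exelets_vm_concurrency coverage))

-- ===== PRECONDITION & SPEC =====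
-- Python A raises ValueError (min of an empty sequence) when migration_shards < 1
def Pre_generate_migration_shards_text_py (exelets_vm_concurrency : Int) (migration_shards : Int) (coverage : Bool) : Prop :=
  1 ≤ migration_shards
instance (exelets_vm_concurrency : Int) (migration_shards : Int) (coverage : Bool) : Decidable (Pre_generate_migration_shards_text_py exelets_vm_concurrency migration_shards coverage) := by unfold Pre_generate_migration_shards_text_py; infer_instance
def pvWitness_generate_migration_shards_text_py : Int × Int × Bool := (4, 2, true)
def Spec_generate_migration_shards_text_py (exelets_vm_concurrency : Int) (migration_shards : Int) (coverage : Bool) (out : String) : Prop := out = generate_migration_shards_text_py_alt exelets_vm_concurrency migration_shards coverage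
instance (exelets_vm_concurrency : Int) (migration_shards : Int) (coverage : Bool) (out : String) : Decidable (Spec_generate_migration_shards_text_py exelets_vm_concurrency migration_shards coverage out) := by unfold Spec_generate_migration_shards_text_py; infer_instance

-- ===== CLAIM (what is proved, stated in full; the proofs are below) =====
def Claim_equal_generate_migration_shards_text_py : Prop := ∀ (exelets_vm_concurrency : Int) (migration_shards : Int) (coverage : Bool), Dom_generate_migration_shards_text_py exelets_vm_concurrency migration_shards coverage → Pre_generate_migration_shards_text_py exelets_vm_concurrency migration_shards coverage → Spec_generate_migration_shards_text_py exelets_vm_concurrency migration_shards coverage (generate_migration_shards_text_py exelets_vm_concurrency migration_shards coverage)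

-- ===== LEMMAS AND PROOFS =====

-- MIGRATION_TEST_COSTS in decreasing-cost order (both ports' sorts produce it)
def pvTests : List (String × Int) := [
  ("TestDirectMigrationOperatorSSHLive", 55),
  ("TestDirectMigrationLive", 51),
  ("TestDirectMigrationResumable", 34),
  ("TestDirectMigrationOperatorSSHCold", 32),
  ("TestDirectMigrationCold", 31),
  ("TestDirectMigrationOrphanedDataset", 30),
  ("TestDirectMigrationReconnect", 25),
  ("TestDirectMigrationResumablePhase2", 24)]

theorem pvSortedA_eq : PySem.List.sorted pvCosts (fun t => -t.2) false = pvTests := by decide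

theorem pvSortedB_eq : PySem.List.sorted pvCosts (fun t => t.2) true = pvTests := by decide

theorem pvMapConstRange {α : Type} (n : Int) (x : α) :
    (PySem.List.pyRange 0 n 1).map (fun _ => x) = List.replicate n.toNat x := by
  rw [PySem.List.pyRange_one]
  simp [List.eq_replicate_iff]

theorem pvGetD_app {α : Type} (xs : List α) (r : Nat) (hr : 0 < r) (a d : α) :
    (xs ++ List.replicate r a).getD xs.length d = a := by
  cases r with
  | zero => omega
  | succ n =>
      rw [List.replicate_succ]
      simp [List.getD]

theorem pvSet_app {α : Type} (xs : List α) (r : Nat) (hr : 0 < r) (a v : α) :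
    (xs ++ List.replicate r a).set xs.length v = xs ++ v :: List.replicate (r - 1) a := by
  cases r with
  | zero => omega
  | succ n =>
      rw [List.set_append_right _ _ (le_refl xs.length)]
      simp [List.replicate_succ]

theorem pvMinApp (cs : List Int) (r : Nat) (hr : 0 < r) (hpos : ∀ x ∈ cs, 0 < x) :
    PySem.List.min? (cs ++ List.replicate r 0) (fun x => x) = some 0 := by
  have hne : cs ++ List.replicate r (0 : Int) ≠ [] := by
    simp [List.append_eq_nil_iff]; omega
  obtain ⟨m, hm⟩ : ∃ m, PySem.List.min? (cs ++ List.replicate r (0 : Int)) (fun x => x) = some m := by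
    rcases h : PySem.List.min? (cs ++ List.replicate r (0 : Int)) (fun x => x) with _ | m
    · exact absurd ((PySem.List.min?_eq_none_iff _ _).1 h) hne
    · exact ⟨m, rfl⟩
  have hzmem : (0 : Int) ∈ cs ++ List.replicate r (0 : Int) := by
    refine List.mem_append_right _ ?_
    simp [List.mem_replicate]; omega
  have hle := PySem.List.min?_isMin hm 0 hzmem
  have hmem := PySem.List.min?_mem hm
  rcases List.mem_append.1 hmem with h1 | h1
  · exact absurd (hpos m h1) (by simpa using hle)
  · rw [hm, (List.eq_of_mem_replicate h1 : m = 0)]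

theorem pvIdxApp (cs : List Int) (r : Nat) (hr : 0 < r) (hpos : ∀ x ∈ cs, 0 < x) :
    PySem.List.index? (cs ++ List.replicate r 0) 0 = some cs.length := by
  rw [PySem.List.index?_eq_some_iff]
  refine ⟨cs, List.replicate (r - 1) 0, ?_, rfl, fun h => absurd (hpos 0 h) (lt_irrefl 0)⟩
  cases r with
  | zero => omega
  | succ n => simp [List.replicate_succ]

theorem pvStepA_eq (sh : List (List String)) (cs : List Int) (r : Nat) (nm : String) (c : Int)
    (hlen : sh.length = cs.length) (hr : 0 < r) (hpos : ∀ x ∈ cs, 0 < x) :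
    pvStepA (sh ++ List.replicate r [], cs ++ List.replicate r 0) (nm, c)
      = (sh ++ [nm] :: List.replicate (r - 1) [], cs ++ c :: List.replicate (r - 1) 0) := by
  unfold pvStepA
  rw [pvMinApp cs r hr hpos]
  simp only [Option.getD_some]
  rw [pvIdxApp cs r hr hpos]
  simp only [Option.getD_some, PySem.List.pySetD_natCast, PySem.List.pyGetD_natCast]
  rw [← hlen, pvGetD_app sh r hr, pvSet_app sh r hr, hlen, pvGetD_app cs r hr, pvSet_app cs r hr]
  simp

theorem pvFoldA (ts : List (String × Int)) : ∀ (sh : List (List String)) (cs : List Int) (r : Nat),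
    sh.length = cs.length → (∀ x ∈ cs, 0 < x) → (∀ t ∈ ts, 0 < t.2) → ts.length ≤ r →
    List.foldl pvStepA (sh ++ List.replicate r [], cs ++ List.replicate r 0) ts
      = (sh ++ ts.map (fun t => [t.1]) ++ List.replicate (r - ts.length) [],
         cs ++ ts.map (fun t => t.2) ++ List.replicate (r - ts.length) 0) := by
  induction ts with
  | nil => intro sh cs r h1 h2 h3 h4; simp
  | cons t ts ih =>
      intro sh cs r h1 h2 h3 h4
      obtain ⟨nm, c⟩ := t
      have hr0 : 0 < r := by simp at h4; omega
      rw [List.foldl_cons, pvStepA_eq sh cs r nm c h1 hr0 h2]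
      have hpos' : ∀ x ∈ cs ++ [c], 0 < x := by
        intro x hx
        simp only [List.mem_append, List.mem_singleton] at hx
        rcases hx with h | h
        · exact h2 x h
        · exact h ▸ h3 (nm, c) (by simp)
      have := ih (sh ++ [[nm]]) (cs ++ [c]) (r - 1) (by simp [h1]) hpos'
        (fun t ht => h3 t (List.mem_cons_of_mem _ ht)) (by simp at h4 ⊢; omega)
      simp only [List.append_assoc, List.singleton_append] at this
      rw [this]
      have hk : r - 1 - ts.length = r - (ts.length + 1) := by omega
      simp [hk]

-- the balanced split for 8 ≤ n: each test on its own shard, in decreasing-cost order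
def pvFinal8 : List (List String) := [
  ["TestDirectMigrationOperatorSSHLive"],
  ["TestDirectMigrationLive"],
  ["TestDirectMigrationResumable"],
  ["TestDirectMigrationOperatorSSHCold"],
  ["TestDirectMigrationCold"],
  ["TestDirectMigrationOrphanedDataset"],
  ["TestDirectMigrationReconnect"],
  ["TestDirectMigrationResumablePhase2"]]

theorem pvSplitA_big (ms : Int) (h : 8 ≤ ms) :
    pvSplitA ms = pvFinal8 ++ List.replicate (ms.toNat - 8) [] := by
  simp only [pvSplitA]
  rw [pvSortedA_eq, pvMapConstRange, PySem.List.pyRepeat_singleton]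
  have h8 : 8 ≤ ms.toNat := by omega
  have := pvFoldA pvTests [] [] ms.toNat rfl (by simp) (by decide) (by simp [pvTests]; omega)
  simp only [List.nil_append] at this
  rw [this]
  simp [pvTests, pvFinal8]

theorem pvInsort_skip (zs : List (Int × Int)) (q : List (Int × Int)) (e : Int × Int)
    (h : ∀ x ∈ zs, pvLtPair x e = true) :
    pvInsort (zs ++ q) e = zs ++ pvInsort q e := by
  induction zs with
  | nil => simp
  | cons z zs ih =>
      simp only [List.cons_append, pvInsort, h z (by simp)]
      rw [ih (fun x hx => h x (List.mem_cons_of_mem _ hx))]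
      simp

theorem pvMem_insort (q : List (Int × Int)) (e x : Int × Int) (hx : x ∈ pvInsort q e) :
    x = e ∨ x ∈ q := by
  induction q with
  | nil => simp [pvInsort] at hx; simp [hx]
  | cons z q ih =>
      simp only [pvInsort] at hx
      split at hx
      · rcases List.mem_cons.1 hx with h | h
        · right; simp [h]
        · rcases ih h with h' | h'
          · left; exact h'
          · right; exact List.mem_cons_of_mem _ h'
      · rcases List.mem_cons.1 hx with h | h
        · left; exact h
        · right; exact h

theorem pvStepB_eq (sh : List (List String)) (q : List (Int × Int)) (ms : Int) (nm : String) (c : Int)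
    (hlt : (sh.length : Int) < ms) (hc : 0 < c) :
    pvStepB (sh ++ List.replicate (ms.toNat - sh.length) [],
             (PySem.List.pyRange (sh.length : Int) ms 1).map (fun i => ((0 : Int), i)) ++ q) (nm, c)
      = (sh ++ [nm] :: List.replicate (ms.toNat - sh.length - 1) [],
         (PySem.List.pyRange ((sh.length : Int) + 1) ms 1).map (fun i => ((0 : Int), i))
           ++ pvInsort q (c, (sh.length : Int))) := by
  unfold pvStepB
  rw [PySem.List.pyRange_one_cons hlt]
  simp only [List.map_cons, List.cons_append, PySem.List.pop?_zero_cons, Option.getD_some]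
  have hr : 0 < ms.toNat - sh.length := by omega
  simp only [PySem.List.pySetD_natCast, PySem.List.pyGetD_natCast]
  rw [pvGetD_app sh _ hr, pvSet_app sh _ hr, zero_add]
  rw [pvInsort_skip _ q (c, (sh.length : Int))
      (by intro x hx; simp only [List.mem_map] at hx
          obtain ⟨i, _, hi⟩ := hx; subst hi; simp [pvLtPair]; omega)]
  simp

theorem pvFoldB (ts : List (String × Int)) : ∀ (sh : List (List String)) (q : List (Int × Int)) (ms : Int),
    (∀ x ∈ q, 0 < x.1) → (∀ t ∈ ts, 0 < t.2) → (sh.length : Int) + ts.length ≤ ms →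
    (List.foldl pvStepB (sh ++ List.replicate (ms.toNat - sh.length) [],
        (PySem.List.pyRange (sh.length : Int) ms 1).map (fun i => ((0 : Int), i)) ++ q) ts).1
      = sh ++ ts.map (fun t => [t.1]) ++ List.replicate (ms.toNat - sh.length - ts.length) [] := by
  induction ts with
  | nil => intro sh q ms h1 h2 h3; simp
  | cons t ts ih =>
      intro sh q ms h1 h2 h3
      obtain ⟨nm, c⟩ := t
      have hlt : (sh.length : Int) < ms := by
        simp only [List.length_cons] at h3; push_cast at h3; omega
      rw [List.foldl_cons, pvStepB_eq sh q ms nm c hlt (h2 (nm, c) (by simp))]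
      have hq' : ∀ x ∈ pvInsort q (c, (sh.length : Int)), 0 < x.1 := by
        intro x hx
        rcases pvMem_insort _ _ _ hx with h | h
        · exact h ▸ h2 (nm, c) (by simp)
        · exact h1 x h
      have := ih (sh ++ [[nm]]) (pvInsort q (c, (sh.length : Int))) ms hq'
        (fun t ht => h2 t (List.mem_cons_of_mem _ ht))
        (by simp only [List.length_append, List.length_cons, List.length_nil] at h3 ⊢
            push_cast at h3 ⊢; omega)
      simp only [List.append_assoc, List.singleton_append, List.length_append,
        List.length_cons, List.length_nil, Nat.cast_add, Nat.cast_one, zero_add] at this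
      rw [show ms.toNat - (sh.length + 1) = ms.toNat - sh.length - 1 from by omega] at this
      rw [this]
      have hk : ms.toNat - sh.length - 1 - ts.length = ms.toNat - sh.length - (ts.length + 1) := by
        omega
      simp [hk]

theorem pvSplitB_big (ms : Int) (h : 8 ≤ ms) :
    pvSplitB ms = pvFinal8 ++ List.replicate (ms.toNat - 8) [] := by
  simp only [pvSplitB]
  rw [pvSortedB_eq, pvMapConstRange]
  have := pvFoldB pvTests [] [] ms (by simp) (by decide) (by simp [pvTests]; omega)
  simp only [List.length_nil, Nat.cast_zero, List.nil_append, Nat.sub_zero, List.append_nil] at this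
  rw [this]
  simp [pvTests, pvFinal8]

set_option maxHeartbeats 4000000 in
theorem pvSplit_eq (ms : Int) (h : 1 ≤ ms) : pvSplitA ms = pvSplitB ms := by
  rcases lt_or_ge ms 8 with h8 | h8
  · interval_cases ms <;> decide
  · rw [pvSplitA_big ms h8, pvSplitB_big ms h8]

-- one YAML step of A as a line list
def pvLines (exelets_vm_concurrency : Int) (migration_shards : Int) (coverage : Bool)
    (it : Int × List String) : List String :=
  ["- label: \":arrow_right_hook: e1e migration (" ++ PySem.Int.toStr (it.1 + 1) ++ "/" ++ PySem.Int.toStr migration_shards ++ ")\"",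
   "  key: test-exelets-" ++ ("migration-" ++ PySem.Int.toStr (it.1 + 1)),
   "  depends_on:",
   "    - build-e1e",
   "    - ensure-snapshot",
   "  command: python3 .buildkite/steps/test-e1e-exelets.py",
   "  timeout_in_minutes: 10",
   "  env:",
   "    VM_DRIVER: cloudhypervisor",
   "    E1E_EXELETS_VM_CONCURRENCY: \"" ++ PySem.Int.toStr exelets_vm_concurrency ++ "\"",
   "    E1E_EXELETS_RUN_FILTER: \"" ++ ("^(" ++ PySem.Str.join "|" it.2 ++ ")$") ++ "\"",
   "    E1E_EXELETS_LABEL: \"" ++ ("migration-" ++ PySem.Int.toStr (it.1 + 1)) ++ "\"",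
   "    VCPUS: \"8\""]
  ++ (if coverage then ["    E1E_COVERAGE: \"true\""] else [])
  ++ ["  artifact_paths:",
      "    - \"e1e-results-" ++ ("migration-" ++ PySem.Int.toStr (it.1 + 1)) ++ ".json\"",
      "    - \"test-gantt-" ++ ("migration-" ++ PySem.Int.toStr (it.1 + 1)) ++ ".html\"",
      "    - \"e1e-results-" ++ ("migration-" ++ PySem.Int.toStr (it.1 + 1)) ++ ".xml\"",
      "    - \"e1e-logs-" ++ ("migration-" ++ PySem.Int.toStr (it.1 + 1)) ++ "/**/*\""]
  ++ (if coverage then ["    - \"coverage-" ++ ("migration-" ++ PySem.Int.toStr (it.1 + 1)) ++ ".txt\""] else [])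
  ++ [""]

set_option maxHeartbeats 2000000 in
theorem pvA_shape (exelets_vm_concurrency : Int) (migration_shards : Int) (coverage : Bool) :
    generate_migration_shards_text_py exelets_vm_concurrency migration_shards coverage
      = PySem.Str.join "\n" ((PySem.List.enumerate (pvSplitA migration_shards) 0).flatMap
          (pvLines exelets_vm_concurrency migration_shards coverage)) := by
  simp only [generate_migration_shards_text_py]
  refine congrArg _ (Eq.trans (PySem.List.foldl_congr_mem _ _ _ _ ?_)
    (Eq.trans (PySem.List.foldl_append_eq_flatMap _ _ _) (List.nil_append _)))
  intro acc it _
  cases coverage <;> simp [pvLines, List.append_assoc]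

theorem pvCharsJoin_append (sep : List Char) (a b : List (List Char)) (ha : a ≠ []) (hb : b ≠ []) :
    PySem.Chars.join sep (a ++ b) = PySem.Chars.join sep a ++ sep ++ PySem.Chars.join sep b := by
  induction a with
  | nil => exact absurd rfl ha
  | cons x a ih =>
      cases a with
      | nil =>
          cases b with
          | nil => exact absurd rfl hb
          | cons y t => simp [PySem.Chars.join_cons_cons, PySem.Chars.join_singleton]
      | cons z a' =>
          rw [List.cons_append, List.cons_append, PySem.Chars.join_cons_cons,
              PySem.Chars.join_cons_cons, ← List.cons_append, ih (by simp)]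
          simp [List.append_assoc]

theorem pvJoin_flat {α : Type} (l : List α) (f : α → List String) (hf : ∀ x, f x ≠ []) :
    PySem.Str.join "\n" (l.flatMap f)
      = PySem.Str.join "\n" (l.map (fun x => PySem.Str.join "\n" (f x))) := by
  apply String.ext
  rw [PySem.Str.toList_join, PySem.Str.toList_join]
  induction l with
  | nil => simp
  | cons x l ih =>
      rw [List.flatMap_cons, List.map_append]
      cases l with
      | nil => simp [PySem.Chars.join_singleton, PySem.Str.toList_join]
      | cons y t =>
          rw [pvCharsJoin_append _ _ _ (by simp [hf x])
                (by simp [List.flatMap_cons, hf y]), ih]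
          simp [List.map_cons, PySem.Chars.join_cons_cons, PySem.Str.toList_join,
            List.append_assoc]

theorem pvStrJoin_cons_cons (p q : String) (rest : List String) :
    PySem.Str.join "\n" (p :: q :: rest) = p ++ "\n" ++ PySem.Str.join "\n" (q :: rest) := by
  apply String.ext
  simp [PySem.Str.toList_join, PySem.Chars.join_cons_cons]

theorem pvStrJoin_singleton (p : String) : PySem.Str.join "\n" [p] = p := by
  apply String.ext
  simp [PySem.Str.toList_join, PySem.Chars.join_singleton]

set_option maxRecDepth 16384 in
set_option maxHeartbeats 4000000 in
theorem pvBlock_join (exelets_vm_concurrency : Int) (migration_shards : Int) (coverage : Bool)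
    (it : Int × List String) :
    PySem.Str.join "\n" (pvLines exelets_vm_concurrency migration_shards coverage it)
      = pvBlock (it.1 + 1) migration_shards it.2 exelets_vm_concurrency coverage := by
  obtain ⟨i, tests⟩ := it
  cases coverage <;>
    · simp only [pvLines, pvBlock, List.cons_append, List.nil_append, if_true, if_false,
        Bool.false_eq_true]
      simp only [pvStrJoin_cons_cons, pvStrJoin_singleton]
      apply String.ext
      simp [String.toList_append]

theorem pvLines_ne (exelets_vm_concurrency : Int) (migration_shards : Int) (coverage : Bool)
    (it : Int × List String) :
    pvLines exelets_vm_concurrency migration_shards coverage it ≠ [] := by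
  cases coverage <;> simp [pvLines]

-- ===== VERDICT (by name: the statement is the Claim_ definition above) =====
theorem generate_migration_shards_text_py_spec : Claim_equal_generate_migration_shards_text_py := by
  intro evc ms cov hdom hpre
  unfold Spec_generate_migration_shards_text_py
  rw [pvA_shape, pvSplit_eq ms hpre,
      pvJoin_flat _ _ (pvLines_ne evc ms cov)]
  unfold generate_migration_shards_text_py_alt
  exact congrArg _ (List.map_congr_left (fun it _ => pvBlock_join evc ms cov it))
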